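-- pv_equiv track=rewrite | github.com/gaeunpark924/PS-practice | 브루트포스알고리즘/치킨배달_한윤정이 이탈리아에 가서 아이스크림을 사먹는데.py | solution
-- ===== SOURCE A (Python) =====
-- from itertools import combinations
-- from collections import deque
--
-- def solution(n,m,city):
--     #집, 치킨집 위치
--     house = []
--     chicken = []
--     for i in range(n):
--         for j in range(n):
--             if city[i][j] == 1:
--                 house.append([i,j])
--             elif city[i][j] == 2:
--                 chicken.append([i,j])
--     #조합
--     com_l1 = deque(list(combinations(range(0,len(chicken)), m)))
--     #치킨거리 계산
--     chicken_dist = []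
--     sub = []
--     for i in range(len(chicken)):
--         for j in range(len(house)):
--             sub.append(abs(chicken[i][0]-house[j][0]) + abs(chicken[i][1]- house[j][1]))
--         chicken_dist.append(sub)
--         sub = []
--     house_cnt = len(house)
--     #최소거리 계산
--     #city_chick_l1 = []
--     min_city_chick_dist = 100000000000
--     sub_dist = []
--     while com_l1:
--         x = com_l1.popleft()
--         for i in range(len(x)):
--             sub_dist.append(chicken_dist[x[i]])
--         sub_dist = list(zip(*sub_dist))
--         city_chick_dist = 0
--         for i in range(house_cnt):
--             city_chick_dist += min(sub_dist[i])
--         min_city_chick_dist = min(city_chick_dist,min_city_chick_dist)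
--         #city_chick_l1.append(city_chick_dist)
--         sub_dist = []
--     return min_city_chick_dist #min(city_chick_l1)
-- ===== SOURCE B (Python) =====
-- def solution(n, m, city):
--     houses = [(i, j) for i in range(n) for j in range(n) if city[i][j] == 1]
--     shops = [(i, j) for i in range(n) for j in range(n) if city[i][j] == 2]
--     BIG = 100000000000
--     best = BIG
--
--     def go(idx, need, dists):
--         # dists[k] = distance from houses[k] to the nearest shop chosen so far
--         nonlocal best
--         if need == 0:
--             best = min(best, sum(dists))
--             return
--         if idx == len(shops):
--             return
--         si, sj = shops[idx]
--         go(idx + 1, need - 1,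
--            [min(d, abs(si - hi) + abs(sj - hj))
--             for (hi, hj), d in zip(houses, dists)])
--         go(idx + 1, need, dists)
--
--     go(0, m, [BIG] * len(houses))
--     return best
-- ===== Notes on version B (the rewrite author's own statement) =====
-- stated objective: alternative
-- what changed: B replaces A's itertools-combinations enumeration with its precomputed distance matrix, deque and zip-transpose by recursive choose/skip backtracking over the shops that maintains one running per-house nearest-distance vector updated incrementally as each shop is chosen, so no combination list, no matrix and no per-combination minimum scan exist.
import Mathlib
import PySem

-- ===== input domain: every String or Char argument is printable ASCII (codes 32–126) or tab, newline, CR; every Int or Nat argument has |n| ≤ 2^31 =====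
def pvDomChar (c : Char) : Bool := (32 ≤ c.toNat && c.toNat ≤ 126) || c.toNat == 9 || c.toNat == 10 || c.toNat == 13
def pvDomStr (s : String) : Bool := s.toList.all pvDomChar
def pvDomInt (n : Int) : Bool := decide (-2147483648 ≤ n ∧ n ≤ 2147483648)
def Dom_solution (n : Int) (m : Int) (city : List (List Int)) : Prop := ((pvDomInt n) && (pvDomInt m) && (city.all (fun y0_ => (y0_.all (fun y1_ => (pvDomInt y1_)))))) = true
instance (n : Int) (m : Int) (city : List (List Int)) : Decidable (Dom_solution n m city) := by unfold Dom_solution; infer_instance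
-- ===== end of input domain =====

-- B replaces A's combination enumeration over a precomputed distance matrix (deque, zip-transpose)
-- by recursive choose/skip backtracking over the shops, maintaining one running per-house
-- nearest-distance vector updated incrementally (alternative decomposition, same exponential task).
-- ===== PORT A =====
-- zip(*rows) for a list of Int-lists (tuples rendered as lists); exact: length = min of the row
-- lengths (zip of no iterables is empty), entry i = the i-th column.
def pyZipStar (rows : List (List Int)) : List (List Int) :=
  match rows with
  | [] => []
  | r :: rs =>
    (List.range (rs.foldl (fun a l => min a l.length) r.length)).map
      (fun i => (r :: rs).map (fun l => l.getD i 0))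

def solution (n : Int) (m : Int) (city : List (List Int)) : Int :=
  let hc := (PySem.List.pyRange 0 n 1).foldl (fun st i =>
      (PySem.List.pyRange 0 n 1).foldl (fun st j =>
        if PySem.List.pyGetD (PySem.List.pyGetD city i []) j 0 = 1 then (st.1 ++ [(i, j)], st.2)
        else if PySem.List.pyGetD (PySem.List.pyGetD city i []) j 0 = 2 then (st.1, st.2 ++ [(i, j)])
        else st) st) (([], []) : List (Int × Int) × List (Int × Int))
  let house := hc.1
  let chicken := hc.2
  let com_l1 := PySem.List.combinations (PySem.List.pyRange 0 (PySem.List.len chicken) 1) m.toNat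
  let chicken_dist := (PySem.List.pyRange 0 (PySem.List.len chicken) 1).foldl (fun cd i =>
      cd ++ [(PySem.List.pyRange 0 (PySem.List.len house) 1).foldl (fun sub j =>
        sub ++ [|(PySem.List.pyGetD chicken i (0, 0)).1 - (PySem.List.pyGetD house j (0, 0)).1| +
                |(PySem.List.pyGetD chicken i (0, 0)).2 - (PySem.List.pyGetD house j (0, 0)).2|]) []]) []
  let house_cnt := PySem.List.len house
  com_l1.foldl (fun best x =>
    let sub_dist := (PySem.List.pyRange 0 (PySem.List.len x) 1).foldl (fun acc i =>
      acc ++ [PySem.List.pyGetD chicken_dist (PySem.List.pyGetD x i 0) []]) []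
    let t := pyZipStar sub_dist
    let total := (PySem.List.pyRange 0 house_cnt 1).foldl (fun s i =>
      s + (PySem.List.min? (PySem.List.pyGetD t i []) (fun y => y)).getD 0) 0
    min total best) 100000000000

-- ===== PORT B =====
-- go(idx, need, dists): choose/skip recursion over the shop list, with the running per-house
-- nearest-distance vector dists and the nonlocal best threaded as an accumulator.
def solution_altGo (houses : List (Int × Int)) (shops : List (Int × Int)) (need : Int)
    (dists : List Int) (best : Int) : Int :=
  if need = 0 then min best (dists.foldl (· + ·) 0)
  else
    match shops with
    | [] => best
    | s :: rest =>
      solution_altGo houses rest need dists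
        (solution_altGo houses rest (need - 1)
          ((houses.zip dists).map (fun p => min p.2 (|s.1 - p.1.1| + |s.2 - p.1.2|))) best)

def solution_alt (n : Int) (m : Int) (city : List (List Int)) : Int :=
  let houses := (PySem.List.pyRange 0 n 1).flatMap (fun i =>
    ((PySem.List.pyRange 0 n 1).filter
        (fun j => PySem.List.pyGetD (PySem.List.pyGetD city i []) j 0 == 1)).map (fun j => (i, j)))
  let shops := (PySem.List.pyRange 0 n 1).flatMap (fun i =>
    ((PySem.List.pyRange 0 n 1).filter
        (fun j => PySem.List.pyGetD (PySem.List.pyGetD city i []) j 0 == 2)).map (fun j => (i, j)))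
  solution_altGo houses shops m (List.replicate houses.length 100000000000) 100000000000

-- ===== PRECONDITION & SPEC =====
-- Pre_ excludes exactly the inputs where the Python A raises: a city without a full n×n grid
-- (IndexError), negative m (ValueError from combinations), and m = 0 while some house exists
-- (IndexError from indexing the empty transpose).
def Pre_solution (n : Int) (m : Int) (city : List (List Int)) : Prop :=
  n ≤ (city.length : Int) ∧ (∀ row ∈ city.take n.toNat, n ≤ (row.length : Int)) ∧
  0 ≤ m ∧ (1 ≤ m ∨ ∀ row ∈ city.take n.toNat, ∀ v ∈ row.take n.toNat, v ≠ 1)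
instance (n : Int) (m : Int) (city : List (List Int)) : Decidable (Pre_solution n m city) := by
  unfold Pre_solution; infer_instance
def pvWitness_solution : Int × Int × List (List Int) := (2, 1, [[1, 2], [0, 0]])
def Spec_solution (n : Int) (m : Int) (city : List (List Int)) (out : Int) : Prop := out = solution_alt n m city
instance (n : Int) (m : Int) (city : List (List Int)) (out : Int) : Decidable (Spec_solution n m city out) := by unfold Spec_solution; infer_instance

-- ===== CLAIM (what is proved, stated in full; the proofs are below) =====
def Claim_equal_solution : Prop := ∀ (n : Int) (m : Int) (city : List (List Int)), Dom_solution n m city → Pre_solution n m city → Spec_solution n m city (solution n m city)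

-- ===== LEMMAS AND PROOFS =====

-- A's nested collection loop = B's two comprehensions
theorem pv_collect_inner (f : Int → Int → Int) (i : Int) (js : List Int)
    (h c : List (Int × Int)) :
    js.foldl (fun st j =>
        if f i j = 1 then (st.1 ++ [(i, j)], st.2)
        else if f i j = 2 then (st.1, st.2 ++ [(i, j)])
        else st) (h, c)
    = (h ++ (js.filter (fun j => f i j == 1)).map (fun j => (i, j)),
       c ++ (js.filter (fun j => f i j == 2)).map (fun j => (i, j))) := by
  induction js generalizing h c with
  | nil => simp
  | cons j js ih =>
    by_cases h1 : f i j = 1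
    · simp [List.foldl_cons, h1, ih]
    · by_cases h2 : f i j = 2
      · simp [List.foldl_cons, h2, ih]
      · simp [List.foldl_cons, h1, h2, ih]

theorem pv_collect (f : Int → Int → Int) (is js : List Int) (h c : List (Int × Int)) :
    is.foldl (fun st i => js.foldl (fun st j =>
        if f i j = 1 then (st.1 ++ [(i, j)], st.2)
        else if f i j = 2 then (st.1, st.2 ++ [(i, j)])
        else st) st) (h, c)
    = (h ++ is.flatMap (fun i => (js.filter (fun j => f i j == 1)).map (fun j => (i, j))),
       c ++ is.flatMap (fun i => (js.filter (fun j => f i j == 2)).map (fun j => (i, j)))) := by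
  induction is generalizing h c with
  | nil => simp
  | cons i is ih => simp [List.foldl_cons, pv_collect_inner, ih]

-- min of the lengths over equal-length rows
theorem pv_foldl_min_len {L : Nat} (rs : List (List Int)) (hr : ∀ r ∈ rs, r.length = L) :
    rs.foldl (fun a l => min a l.length) L = L := by
  induction rs with
  | nil => rfl
  | cons r rs ih =>
    have h1 := hr r (by simp)
    simp only [List.foldl_cons, h1, min_self]
    exact ih (fun r h => hr r (by simp [h]))

-- an index-range sum over the rows of t, as Python writes it, is a fold over t
theorem pv_sum_pyRange (t : List (List Int)) (L : Nat) (hL : t.length = L) :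
    (PySem.List.pyRange 0 (L : Int) 1).foldl (fun s i =>
        s + (PySem.List.min? (PySem.List.pyGetD t i []) (fun y => y)).getD 0) 0
    = t.foldl (fun s row => s + (PySem.List.min? row (fun y => y)).getD 0) 0 := by
  subst hL
  exact PySem.List.foldl_pyRange_zero_pyGetD' t []
    (fun s row => s + (PySem.List.min? row (fun y => y)).getD 0) 0

-- per-combination totals agree: A's transpose-then-min column sum = the direct per-house minimum sum
theorem pv_combo_eq (house : List (Int × Int)) (dd : Int → Int × Int → Int) (x : List Int) :
    (PySem.List.pyRange 0 (house.length : Int) 1).foldl (fun s i =>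
        s + (PySem.List.min? (PySem.List.pyGetD
              (pyZipStar (x.map (fun k => house.map (fun h => dd k h)))) i [])
            (fun y => y)).getD 0) 0
    = house.foldl (fun tot h =>
        tot + (PySem.List.min? (x.map (fun k => dd k h)) (fun y => y)).getD 0) 0 := by
  cases x with
  | nil =>
    rw [PySem.List.foldl_add house (fun h =>
      (PySem.List.min? (([] : List Int).map (fun k => dd k h)) (fun y => y)).getD 0) 0]
    rw [PySem.List.foldl_add (PySem.List.pyRange 0 (house.length : Int) 1) (fun i =>
      (PySem.List.min? (PySem.List.pyGetD
        (pyZipStar (([] : List Int).map (fun k => house.map (fun h => dd k h)))) i [])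
        (fun y => y)).getD 0) 0]
    simp [pyZipStar, PySem.List.pyGetD, PySem.List.pyGet?]
  | cons k ks =>
    have ht : pyZipStar ((k :: ks).map (fun k' => house.map (fun h => dd k' h)))
        = (List.range house.length).map (fun i =>
            ((k :: ks).map (fun k' => house.map (fun h => dd k' h))).map (fun l => l.getD i 0)) := by
      simp only [List.map_cons, pyZipStar, List.length_map]
      rw [pv_foldl_min_len]
      intro r hr
      obtain ⟨k', _, rfl⟩ := List.mem_map.mp hr
      exact List.length_map ..
    rw [ht]
    rw [pv_sum_pyRange _ house.length (by simp)]
    rw [List.foldl_map]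
    rw [PySem.List.foldl_add (List.range house.length) (fun i =>
      (PySem.List.min? (((k :: ks).map (fun k' => house.map (fun h => dd k' h))).map
        (fun l => l.getD i 0)) (fun y => y)).getD 0) 0]
    rw [PySem.List.foldl_add house (fun h =>
      (PySem.List.min? ((k :: ks).map (fun k' => dd k' h)) (fun y => y)).getD 0) 0]
    congr 1
    refine congrArg List.sum (List.ext_getElem (by simp) ?_)
    intro i h1 h2
    have hi : i < house.length := by simpa using h1
    have hget : ∀ k' : Int, (house.map (fun h => dd k' h)).getD i 0 = dd k' house[i] := by
      intro k'
      rw [List.getD_eq_getElem _ _ (by simpa using hi)]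
      simp
    simp only [List.getElem_map, List.getElem_range, List.map_map]
    exact congrArg (fun l => (PySem.List.min? l (fun y => y)).getD 0)
      (List.map_congr_left (fun k' _ => hget k'))

-- the whole per-subset minimisation, with house/shops already collected
theorem pv_main (house shops : List (Int × Int)) (r : Nat) :
    (PySem.List.combinations (PySem.List.pyRange 0 (PySem.List.len shops) 1) r).foldl
      (fun best x =>
        min ((PySem.List.pyRange 0 (PySem.List.len house) 1).foldl (fun s i =>
          s + (PySem.List.min? (PySem.List.pyGetD
                (pyZipStar ((PySem.List.pyRange 0 (PySem.List.len x) 1).foldl (fun acc i =>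
                  acc ++ [PySem.List.pyGetD
                    ((PySem.List.pyRange 0 (PySem.List.len shops) 1).foldl (fun cd i =>
                      cd ++ [(PySem.List.pyRange 0 (PySem.List.len house) 1).foldl (fun sub j =>
                        sub ++ [|(PySem.List.pyGetD shops i (0, 0)).1 - (PySem.List.pyGetD house j (0, 0)).1| +
                                |(PySem.List.pyGetD shops i (0, 0)).2 - (PySem.List.pyGetD house j (0, 0)).2|]) []]) [])
                    (PySem.List.pyGetD x i 0) []]) []))
                i [])
              (fun y => y)).getD 0) 0)
          best) 100000000000
    = (PySem.List.combinations (PySem.List.pyRange 0 (PySem.List.len shops) 1) r).foldl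
      (fun best x =>
        min best (house.foldl (fun tot h =>
          tot + (PySem.List.min? (x.map (fun k =>
                |(PySem.List.pyGetD shops k (0, 0)).1 - h.1| +
                |(PySem.List.pyGetD shops k (0, 0)).2 - h.2|)) (fun y => y)).getD 0) 0)) 100000000000 := by
  simp only [PySem.List.len_eq]
  apply PySem.List.foldl_congr_mem'
  intro x hx best
  have hsub : ∀ k ∈ x, 0 ≤ k ∧ k < (shops.length : Int) := by
    intro k hk
    have hs := PySem.List.sublist_of_mem_combinations hx
    have hmem := hs.subset hk
    have h2 := PySem.List.mem_pyRange_one.mp (by simpa using hmem)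
    simpa using h2
  rw [min_comm]
  congr 1
  have hrow : ∀ c : Int × Int,
      (PySem.List.pyRange 0 (house.length : Int) 1).foldl (fun sub j =>
        sub ++ [|c.1 - (PySem.List.pyGetD house j ((0 : Int), (0 : Int))).1| +
                |c.2 - (PySem.List.pyGetD house j ((0 : Int), (0 : Int))).2|]) []
      = house.map (fun h => |c.1 - h.1| + |c.2 - h.2|) := by
    intro c
    rw [PySem.List.foldl_pyRange_zero_pyGetD' house ((0 : Int), (0 : Int))
      (fun sub h => sub ++ [|c.1 - h.1| + |c.2 - h.2|]) []]
    rw [PySem.List.foldl_append_singleton_eq_map (fun h => |c.1 - h.1| + |c.2 - h.2|) house []]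
    simp
  have hCD : (PySem.List.pyRange 0 (shops.length : Int) 1).foldl (fun cd i =>
        cd ++ [(PySem.List.pyRange 0 (house.length : Int) 1).foldl (fun sub j =>
          sub ++ [|(PySem.List.pyGetD shops i ((0 : Int), (0 : Int))).1 -
                     (PySem.List.pyGetD house j ((0 : Int), (0 : Int))).1| +
                  |(PySem.List.pyGetD shops i ((0 : Int), (0 : Int))).2 -
                     (PySem.List.pyGetD house j ((0 : Int), (0 : Int))).2|]) []]) []
      = shops.map (fun c => house.map (fun h => |c.1 - h.1| + |c.2 - h.2|)) := by
    rw [PySem.List.foldl_pyRange_zero_pyGetD' shops ((0 : Int), (0 : Int))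
      (fun cd c => cd ++ [(PySem.List.pyRange 0 (house.length : Int) 1).foldl (fun sub j =>
          sub ++ [|c.1 - (PySem.List.pyGetD house j ((0 : Int), (0 : Int))).1| +
                  |c.2 - (PySem.List.pyGetD house j ((0 : Int), (0 : Int))).2|]) []]) []]
    rw [PySem.List.foldl_append_singleton_eq_map
      (fun c => (PySem.List.pyRange 0 (house.length : Int) 1).foldl (fun sub j =>
          sub ++ [|c.1 - (PySem.List.pyGetD house j ((0 : Int), (0 : Int))).1| +
                  |c.2 - (PySem.List.pyGetD house j ((0 : Int), (0 : Int))).2|]) []) shops []]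
    simp only [List.nil_append]
    exact List.map_congr_left (fun c _ => hrow c)
  rw [hCD]
  rw [PySem.List.foldl_pyRange_zero_pyGetD' x 0
    (fun acc k => acc ++ [PySem.List.pyGetD
      (shops.map (fun c => house.map (fun h => |c.1 - h.1| + |c.2 - h.2|))) k []]) []]
  rw [PySem.List.foldl_append_singleton_eq_map
    (fun k => PySem.List.pyGetD
      (shops.map (fun c => house.map (fun h => |c.1 - h.1| + |c.2 - h.2|))) k []) x []]
  simp only [List.nil_append]
  have hmapx : x.map (fun k => PySem.List.pyGetD
        (shops.map (fun c => house.map (fun h => |c.1 - h.1| + |c.2 - h.2|))) k [])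
      = x.map (fun k => house.map (fun h =>
          |(PySem.List.pyGetD shops k ((0 : Int), (0 : Int))).1 - h.1| +
          |(PySem.List.pyGetD shops k ((0 : Int), (0 : Int))).2 - h.2|)) := by
    refine List.map_congr_left (fun k hk => ?_)
    obtain ⟨h0, h1⟩ := hsub k hk
    rw [PySem.List.pyGetD_eq_getElem _ [] h0 (by simpa using h1),
        PySem.List.pyGetD_eq_getElem shops ((0 : Int), (0 : Int)) h0 h1, List.getElem_map]
  rw [hmapx]
  exact pv_combo_eq house (fun k h =>
    |(PySem.List.pyGetD shops k ((0 : Int), (0 : Int))).1 - h.1| +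
    |(PySem.List.pyGetD shops k ((0 : Int), (0 : Int))).2 - h.2|) x

-- ---- B-side lemmas ----

-- zip with a same-length replicate pairs every element with the constant
theorem pv_zip_replicate (houses : List (Int × Int)) (a : Int) :
    houses.zip (List.replicate houses.length a) = houses.map (fun h => (h, a)) := by
  induction houses with
  | nil => rfl
  | cons h hs ih => simp [List.replicate_succ, ih]

-- updating the distance vector by one shop = prepending that shop to the chosen list
theorem pv_V_cons (houses : List (Int × Int)) (dists : List Int) (s : Int × Int)
    (c : List (Int × Int)) :
    ((houses.zip ((houses.zip dists).map
        (fun p => min p.2 (|s.1 - p.1.1| + |s.2 - p.1.2|)))).map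
      (fun p => c.foldl (fun d t => min d (|t.1 - p.1.1| + |t.2 - p.1.2|)) p.2)).sum
    = ((houses.zip dists).map
      (fun p => (s :: c).foldl (fun d t => min d (|t.1 - p.1.1| + |t.2 - p.1.2|)) p.2)).sum := by
  induction houses generalizing dists with
  | nil => rfl
  | cons h hs ih =>
    cases dists with
    | nil => rfl
    | cons d ds => simp [List.foldl_cons, ih ds]

-- the backtracking loop computes the fold of per-subset totals over all `need`-subsets
theorem pv_goB_eq (houses : List (Int × Int)) (shops : List (Int × Int)) (need : Int)
    (hne : 0 ≤ need) (dists : List Int) (hlen : dists.length = houses.length) (best : Int) :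
    solution_altGo houses shops need dists best
    = (PySem.List.combinations shops need.toNat).foldl
        (fun b c => min b (((houses.zip dists).map
          (fun p => c.foldl (fun d t => min d (|t.1 - p.1.1| + |t.2 - p.1.2|)) p.2)).sum)) best := by
  induction shops generalizing need dists best with
  | nil =>
    rw [solution_altGo]
    by_cases h0 : need = 0
    · subst h0
      simp only [Int.toNat_zero, PySem.List.combinations_zero, List.foldl_cons, List.foldl_nil]
      have hsz : (houses.zip dists).map (fun p : (Int × Int) × Int => p.2) = dists :=
        List.map_snd_zip (by omega)
      simp [hsz, List.sum_eq_foldl]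
    · obtain ⟨k, hk⟩ : ∃ k, need.toNat = k + 1 := ⟨need.toNat - 1, by omega⟩
      simp [if_neg h0, hk, PySem.List.combinations_nil_succ]
  | cons s rest ih =>
    rw [solution_altGo]
    by_cases h0 : need = 0
    · subst h0
      simp only [Int.toNat_zero, PySem.List.combinations_zero, List.foldl_cons, List.foldl_nil]
      have hsz : (houses.zip dists).map (fun p : (Int × Int) × Int => p.2) = dists :=
        List.map_snd_zip (by omega)
      simp [hsz, List.sum_eq_foldl]
    · rw [if_neg h0]
      have h1 : 1 ≤ need := by omega
      have hlen' : ((houses.zip dists).map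
          (fun p => min p.2 (|s.1 - p.1.1| + |s.2 - p.1.2|))).length = houses.length := by
        simp [hlen]
      rw [ih (need - 1) (by omega) _ hlen' best]
      rw [ih need hne dists hlen]
      have htn : need.toNat = (need - 1).toNat + 1 := by omega
      rw [htn, PySem.List.combinations_cons_succ, List.foldl_append, List.foldl_map]
      congr 1
      apply List.foldl_ext
      intro b c _hc
      rw [pv_V_cons]

-- the two comprehension coordinate lists have all coordinates in [0, n)
theorem pv_mem_coords (city : List (List Int)) (n v : Int) (p : Int × Int)
    (hp : p ∈ (PySem.List.pyRange 0 n 1).flatMap (fun i =>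
      ((PySem.List.pyRange 0 n 1).filter
        (fun j => PySem.List.pyGetD (PySem.List.pyGetD city i []) j 0 == v)).map
        (fun j => (i, j)))) :
    0 ≤ p.1 ∧ p.1 < n ∧ 0 ≤ p.2 ∧ p.2 < n := by
  simp only [List.mem_flatMap, List.mem_map, List.mem_filter,
    PySem.List.mem_pyRange_one] at hp
  obtain ⟨i, ⟨hi0, hi1⟩, j, ⟨⟨hj0, hj1⟩, _⟩, rfl⟩ := hp
  exact ⟨hi0, hi1, hj0, hj1⟩

-- an element of the first k entries of a list is in its k-prefix
theorem pv_mem_take {a : Type} (l : List a) (k i : Nat) (h1 : i < k) (h2 : i < l.length) :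
    l[i] ∈ l.take k := by
  have h3 : i < (l.take k).length := by simp [h1, h2]
  have h4 : (l.take k)[i]'h3 = l[i] := List.getElem_take
  rw [← h4]
  exact List.getElem_mem h3

-- if the grid holds no 1, the house comprehension is empty
theorem pv_no_house (city : List (List Int)) (n : Int)
    (hn : n ≤ (city.length : Int))
    (hrow : ∀ row ∈ city.take n.toNat, n ≤ (row.length : Int))
    (h1 : ∀ row ∈ city.take n.toNat, ∀ v ∈ row.take n.toNat, v ≠ 1) :
    (PySem.List.pyRange 0 n 1).flatMap (fun i =>
      ((PySem.List.pyRange 0 n 1).filter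
        (fun j => PySem.List.pyGetD (PySem.List.pyGetD city i []) j 0 == 1)).map
        (fun j => (i, j))) = [] := by
  rw [List.flatMap_eq_nil_iff]
  intro i hi
  rw [List.map_eq_nil_iff, List.filter_eq_nil_iff]
  intro j hj
  obtain ⟨hi0, hi1⟩ := PySem.List.mem_pyRange_one.mp hi
  obtain ⟨hj0, hj1⟩ := PySem.List.mem_pyRange_one.mp hj
  have hiN : i.toNat < city.length := by omega
  have hrowi : PySem.List.pyGetD city i [] = city[i.toNat] :=
    PySem.List.pyGetD_eq_getElem city [] hi0 (by omega)
  have hmemrow : city[i.toNat] ∈ city.take n.toNat :=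
    pv_mem_take city n.toNat i.toNat (by omega) hiN
  have hlr : n ≤ (city[i.toNat].length : Int) := hrow _ hmemrow
  have hjN : j.toNat < city[i.toNat].length := by omega
  have hval : PySem.List.pyGetD city[i.toNat] j 0 = city[i.toNat][j.toNat] :=
    PySem.List.pyGetD_eq_getElem _ 0 hj0 (by omega)
  have hmemv : city[i.toNat][j.toNat] ∈ city[i.toNat].take n.toNat :=
    pv_mem_take city[i.toNat] n.toNat j.toNat (by omega) hjN
  have := h1 _ hmemrow _ hmemv
  simp [hrowi, hval, this]

-- per-subset totals: A's min-over-list sum = B's fold from the sentinel, for a nonempty subset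
-- of shops (or no houses), given every distance is below the sentinel
theorem pv_T_eq_V (houses shops : List (Int × Int))
    (hb : ∀ s ∈ shops, ∀ h ∈ houses, |s.1 - h.1| + |s.2 - h.2| < 100000000000)
    (c : List (Int × Int)) (hc : c.Sublist shops) (hcne : houses = [] ∨ c ≠ []) :
    houses.foldl (fun tot h =>
        tot + (PySem.List.min? (c.map (fun t => |t.1 - h.1| + |t.2 - h.2|)) (fun y => y)).getD 0) 0
    = ((houses.zip (List.replicate houses.length 100000000000)).map
        (fun p => c.foldl (fun d t => min d (|t.1 - p.1.1| + |t.2 - p.1.2|)) p.2)).sum := by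
  rcases hcne with hH | hcne
  · subst hH; rfl
  · obtain ⟨s0, cs, rfl⟩ : ∃ s0 cs, c = s0 :: cs := by
      cases c with
      | nil => exact absurd rfl hcne
      | cons a l => exact ⟨a, l, rfl⟩
    rw [pv_zip_replicate, List.map_map]
    rw [PySem.List.foldl_add houses (fun h =>
      (PySem.List.min? ((s0 :: cs).map (fun t => |t.1 - h.1| + |t.2 - h.2|)) (fun y => y)).getD 0) 0]
    simp only [Int.zero_add]
    refine congrArg List.sum (List.map_congr_left ?_)
    intro h hh
    have hs0 : s0 ∈ shops := hc.subset (by simp)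
    have hcs : ∀ t ∈ cs, t ∈ shops := fun t ht => hc.subset (by simp [ht])
    simp only [List.map_cons, PySem.List.min?_id_cons, Option.getD_some, Function.comp]
    rw [List.foldl_cons]
    have hlt : |s0.1 - h.1| + |s0.2 - h.2| < 100000000000 := hb s0 hs0 h hh
    rw [show min (100000000000 : Int) (|s0.1 - h.1| + |s0.2 - h.2|)
        = |s0.1 - h.1| + |s0.2 - h.2| from min_eq_right (le_of_lt hlt)]
    rw [List.foldl_map]

-- index subsets mapped through the shop list = element subsets
theorem pv_idx_to_elem (idx : List Int) (getF : Int → Int × Int) (r : Nat)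
    (T : List (Int × Int) → Int) (b0 : Int) :
    (PySem.List.combinations idx r).foldl (fun b x => min b (T (x.map getF))) b0
    = (PySem.List.combinations (idx.map getF) r).foldl (fun b c => min b (T c)) b0 := by
  rw [PySem.List.combinations_map, List.foldl_map]

-- ===== VERDICT (by name: the statement is the Claim_ definition above) =====
theorem solution_spec : Claim_equal_solution := by
  intro n m city hdom hpre
  obtain ⟨hn, hrow, hm0, hm1⟩ := hpre
  unfold Spec_solution solution solution_alt
  simp only []
  rw [pv_collect (fun i j => PySem.List.pyGetD (PySem.List.pyGetD city i []) j 0)]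
  simp only [List.nil_append]
  rw [pv_main]
  -- abbreviations
  set houses := (PySem.List.pyRange 0 n 1).flatMap (fun i =>
    ((PySem.List.pyRange 0 n 1).filter
        (fun j => PySem.List.pyGetD (PySem.List.pyGetD city i []) j 0 == 1)).map (fun j => (i, j)))
    with hhouses
  set shops := (PySem.List.pyRange 0 n 1).flatMap (fun i =>
    ((PySem.List.pyRange 0 n 1).filter
        (fun j => PySem.List.pyGetD (PySem.List.pyGetD city i []) j 0 == 2)).map (fun j => (i, j)))
    with hshops
  -- n is bounded by Dom
  have hnb : n ≤ 2147483648 := by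
    unfold Dom_solution at hdom
    simp only [pvDomInt, Bool.and_eq_true, decide_eq_true_eq] at hdom
    exact hdom.1.1.2
  have hb : ∀ s ∈ shops, ∀ h ∈ houses, |s.1 - h.1| + |s.2 - h.2| < 100000000000 := by
    intro s hs h hh
    have h1 := pv_mem_coords city n 2 s hs
    have h2 := pv_mem_coords city n 1 h hh
    have e1 : |s.1 - h.1| < n := abs_sub_lt_iff.mpr ⟨by omega, by omega⟩
    have e2 : |s.2 - h.2| < n := abs_sub_lt_iff.mpr ⟨by omega, by omega⟩
    omega
  -- index combinations → element combinations (A side)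
  rw [show (fun (best : Int) (x : List Int) =>
      min best (houses.foldl (fun tot h =>
        tot + (PySem.List.min? (x.map (fun k =>
              |(PySem.List.pyGetD shops k ((0 : Int), (0 : Int))).1 - h.1| +
              |(PySem.List.pyGetD shops k ((0 : Int), (0 : Int))).2 - h.2|)) (fun y => y)).getD 0) 0))
    = (fun (best : Int) (x : List Int) =>
      min best (houses.foldl (fun tot h =>
        tot + (PySem.List.min? ((x.map (fun k => PySem.List.pyGetD shops k ((0 : Int), (0 : Int)))).map
          (fun t => |t.1 - h.1| + |t.2 - h.2|)) (fun y => y)).getD 0) 0)) from by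
    funext best x; simp only [List.map_map, Function.comp_def]]
  simp only [PySem.List.len_eq]
  rw [pv_idx_to_elem (PySem.List.pyRange 0 (shops.length : Int) 1)
    (fun k => PySem.List.pyGetD shops k ((0 : Int), (0 : Int))) m.toNat
    (fun c => houses.foldl (fun tot h =>
      tot + (PySem.List.min? (c.map (fun t => |t.1 - h.1| + |t.2 - h.2|)) (fun y => y)).getD 0) 0)
    100000000000]
  rw [PySem.List.map_pyGetD_pyRange_zero' shops ((0 : Int), (0 : Int))]
  -- per-subset totals agree on every subset in the fold
  rw [PySem.List.foldl_congr_mem' _ _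
    (fun (b : Int) (c : List (Int × Int)) => min b (((houses.zip
        (List.replicate houses.length 100000000000)).map
      (fun p => c.foldl (fun d t => min d (|t.1 - p.1.1| + |t.2 - p.1.2|)) p.2)).sum))
    100000000000 ?_]
  · exact (pv_goB_eq houses shops m hm0 (List.replicate houses.length 100000000000)
      (by simp) 100000000000).symm
  · intro c hc b
    obtain ⟨hsub, hlenc⟩ := (PySem.List.mem_combinations_iff _ _ _).mp hc
    have hcne : houses = [] ∨ c ≠ [] := by
      rcases hm1 with hm1 | hnoh
      · right
        intro hc0
        rw [hc0] at hlenc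
        simp at hlenc
        omega
      · left
        exact pv_no_house city n hn hrow hnoh
    rw [pv_T_eq_V houses shops hb c hsub hcne]
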